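-- pv_equiv track=rewrite | github.com/dimitriderose/amplispark | backend/agents/strategy_agent.py | _enforce_group_size
-- ===== SOURCE A (Python) =====
-- def _enforce_group_size(days: list[dict], max_group_size: int = 3) -> list[dict]:
--     """Break out excess days from oversized pillar_id groups.
--
--     Prevents the LLM from assigning the same pillar_id to all days, which would
--     color every card with the same series accent and make grouping meaningless.
--     Any day beyond the first max_group_size in a group gets a unique standalone ID.
--     """
--     group_seen: dict[str, int] = {}
--     standalone_idx = 9000  # start high to avoid collisions with "series_N" IDs
--     result = []
--     for day in days:
--         pid = day["pillar_id"]
--         count = group_seen.get(pid, 0)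
--         if count >= max_group_size:
--             day = {**day, "pillar_id": f"series_{standalone_idx}", "derivative_type": "original"}
--             standalone_idx += 1
--         else:
--             group_seen[pid] = count + 1
--         result.append(day)
--     return result
-- ===== SOURCE B (Python) =====
-- def _enforce_group_size(days: list[dict], max_group_size: int = 3) -> list[dict]:
--     keep = max(max_group_size, 0)
--     positions: dict[str, list[int]] = {}
--     for i, day in enumerate(days):
--         pid = day["pillar_id"]
--         positions[pid] = positions.get(pid, []) + [i]
--     reassign = set()
--     for idxs in positions.values():
--         for i in idxs[keep:]:
--             reassign.add(i)
--     out = []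
--     standalone_idx = 9000
--     for i, day in enumerate(days):
--         if i in reassign:
--             out.append({**day, "pillar_id": f"series_{standalone_idx}", "derivative_type": "original"})
--             standalone_idx += 1
--         else:
--             out.append(day)
--     return out
-- ===== Notes on version B (the rewrite author's own statement) =====
-- stated objective: alternative
-- what changed: Replaced A's single pass with a capped per-group counter dict by a two-phase plan: first build a dict of occurrence positions per pillar_id, slice each occurrence list past the group limit to get the set of overflow positions, then a second pass over the enumerated days rewrites exactly those positions with fresh series_9000+ ids.
import Mathlib
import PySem

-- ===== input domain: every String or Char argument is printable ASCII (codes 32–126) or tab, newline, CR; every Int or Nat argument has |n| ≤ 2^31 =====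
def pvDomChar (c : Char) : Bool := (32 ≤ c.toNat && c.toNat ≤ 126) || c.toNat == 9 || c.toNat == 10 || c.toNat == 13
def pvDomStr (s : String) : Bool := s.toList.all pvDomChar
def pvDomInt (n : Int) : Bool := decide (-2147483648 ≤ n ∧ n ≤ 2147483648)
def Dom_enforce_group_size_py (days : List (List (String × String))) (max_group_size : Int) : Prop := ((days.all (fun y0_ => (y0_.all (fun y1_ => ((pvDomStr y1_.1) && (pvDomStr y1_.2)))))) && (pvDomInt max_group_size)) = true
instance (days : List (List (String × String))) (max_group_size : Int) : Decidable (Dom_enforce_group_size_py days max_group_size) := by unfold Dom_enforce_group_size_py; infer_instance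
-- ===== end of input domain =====

-- B replaces A's one-pass capped-counter loop by precomputing per-pillar occurrence positions
-- and a set of overflow positions, then rewriting exactly those in a second pass (alternative
-- decomposition, same cost; equal return value on every input where A returns).

-- ===== PORT A =====
-- day["pillar_id"]: KeyError when the key is absent (excluded by Pre_); getD "" is exact under Pre_
def pvPid (day : List (String × String)) : String :=
  ((PySem.Dict.mk day).get? "pillar_id").getD ""

-- {**day, "pillar_id": f"series_{sid}", "derivative_type": "original"} (dict-literal overwrite)
def pvReassigned (day : List (String × String)) (sid : Int) : List (String × String) :=
  (((PySem.Dict.mk day).insert "pillar_id" ("series_" ++ PySem.Int.toStr sid)).insert "derivative_type" "original").items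

def egsStepA (m : Int) (st : PySem.Dict String Int × Int × List (List (String × String)))
    (day : List (String × String)) : PySem.Dict String Int × Int × List (List (String × String)) :=
  let pid := pvPid day
  let count := st.1.getD pid 0
  if m ≤ count then (st.1, st.2.1 + 1, st.2.2 ++ [pvReassigned day st.2.1])
  else (st.1.insert pid (count + 1), st.2.1, st.2.2 ++ [day])

def enforce_group_size_py (days : List (List (String × String))) (max_group_size : Int) :
    List (List (String × String)) :=
  (days.foldl (egsStepA max_group_size) (PySem.Dict.empty, 9000, [])).2.2

-- ===== PORT B =====
-- pass 1: positions[pid] = positions.get(pid, []) + [i]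
def egsPositions (days : List (List (String × String))) : PySem.Dict String (List Int) :=
  (PySem.List.enumerate days).foldl
    (fun d p => d.modify (pvPid p.2) [] (fun l => l ++ [p.1])) PySem.Dict.empty

-- overflow set: every index in idxs[keep:] for each occurrence list
def egsReassign (days : List (List (String × String))) (keep : Int) : PySem.Set Int :=
  (egsPositions days).values.foldl
    (fun s idxs => (PySem.List.slice idxs (some keep)).foldl (fun s i => PySem.Set.add s i) s)
    PySem.Set.empty

def egsStepB (reas : PySem.Set Int) (st : Int × List (List (String × String)))
    (p : Int × List (String × String)) : Int × List (List (String × String)) :=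
  if PySem.Set.contains reas p.1 then (st.1 + 1, st.2 ++ [pvReassigned p.2 st.1])
  else (st.1, st.2 ++ [p.2])

def enforce_group_size_py_alt (days : List (List (String × String))) (max_group_size : Int) :
    List (List (String × String)) :=
  let keep := max max_group_size 0
  let reas := egsReassign days keep
  ((PySem.List.enumerate days).foldl (egsStepB reas) (9000, [])).2

-- ===== PRECONDITION & SPEC =====
-- Pre_ excludes exactly the inputs where Python's day["pillar_id"] raises KeyError (B raises there too).
def Pre_enforce_group_size_py (days : List (List (String × String))) (max_group_size : Int) : Prop :=
  (days.all (fun day => (PySem.Dict.mk day).contains "pillar_id")) = true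
instance (days : List (List (String × String))) (max_group_size : Int) : Decidable (Pre_enforce_group_size_py days max_group_size) := by unfold Pre_enforce_group_size_py; infer_instance

def pvWitness_enforce_group_size_py : (List (List (String × String))) × Int :=
  ([[("pillar_id", "a"), ("topic", "x")], [("pillar_id", "a")], [("pillar_id", "a")]], 2)

def Spec_enforce_group_size_py (days : List (List (String × String))) (max_group_size : Int) (out : List (List (String × String))) : Prop := out = enforce_group_size_py_alt days max_group_size
instance (days : List (List (String × String))) (max_group_size : Int) (out : List (List (String × String))) : Decidable (Spec_enforce_group_size_py days max_group_size out) := by unfold Spec_enforce_group_size_py; infer_instance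

-- ===== CLAIM (what is proved, stated in full; the proofs are below) =====
def Claim_equal_enforce_group_size_py : Prop := ∀ (days : List (List (String × String))) (max_group_size : Int), Dom_enforce_group_size_py days max_group_size → Pre_enforce_group_size_py days max_group_size → Spec_enforce_group_size_py days max_group_size (enforce_group_size_py days max_group_size)

-- ===== LEMMAS AND PROOFS =====

-- common reference recursion: occ carries the TOTAL number of previous occurrences of each pid
-- common reference recursion: occ carries the TOTAL number of previous occurrences of each pid
def egsSpec (m : Int) (occ : PySem.Dict String Int) (sid : Int) :
    List (List (String × String)) → List (List (String × String))
  | [] => []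
  | day :: rest =>
    let c := occ.getD (pvPid day) 0
    if m ≤ c then pvReassigned day sid :: egsSpec m (occ.insert (pvPid day) (c + 1)) (sid + 1) rest
    else day :: egsSpec m (occ.insert (pvPid day) (c + 1)) sid rest

lemma A_eq_spec (m : Int) : ∀ (l : List (List (String × String)))
    (seen occ : PySem.Dict String Int) (sid : Int) (acc : List (List (String × String))),
    (∀ p, seen.getD p 0 = min (occ.getD p 0) (max m 0)) →
    (∀ p, 0 ≤ occ.getD p 0) →
    (l.foldl (egsStepA m) (seen, sid, acc)).2.2 = acc ++ egsSpec m occ sid l := by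
  intro l
  induction l with
  | nil => intro seen occ sid acc _ _; simp [egsSpec]
  | cons day rest ih =>
    intro seen occ sid acc hinv hnn
    have hp := hinv (pvPid day)
    have hq := hnn (pvPid day)
    by_cases hc : m ≤ occ.getD (pvPid day) 0
    · have hcA : m ≤ seen.getD (pvPid day) 0 := by omega
      simp only [List.foldl_cons, egsStepA, egsSpec, if_pos hc, if_pos hcA]
      rw [ih seen (occ.insert (pvPid day) (occ.getD (pvPid day) 0 + 1)) (sid + 1)
          (acc ++ [pvReassigned day sid]) ?_ ?_]
      · simp
      · intro p
        rw [PySem.Dict.getD_insert]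
        split_ifs with h
        · subst h; omega
        · exact hinv p
      · intro p
        rw [PySem.Dict.getD_insert]
        split_ifs with h
        · omega
        · exact hnn p
    · have hcA : ¬ m ≤ seen.getD (pvPid day) 0 := by omega
      simp only [List.foldl_cons, egsStepA, egsSpec, if_neg hc, if_neg hcA]
      rw [ih (seen.insert (pvPid day) (seen.getD (pvPid day) 0 + 1))
          (occ.insert (pvPid day) (occ.getD (pvPid day) 0 + 1)) sid (acc ++ [day]) ?_ ?_]
      · simp
      · intro p
        rw [PySem.Dict.getD_insert, PySem.Dict.getD_insert]
        split_ifs with h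
        · subst h; omega
        · exact hinv p
      · intro p
        rw [PySem.Dict.getD_insert]
        split_ifs with h
        · omega
        · exact hnn p

lemma Pchar (c : String) : ∀ (days : List (List (String × String))) (j : Int) (k : Nat) (x : Int),
    x ∈ (((((PySem.List.enumerate days j).map (fun p => (pvPid p.2, p.1))).filter
        (fun q => q.1 == c)).map (fun q => q.2)).drop k) ↔
    ∃ t, ∃ _ : t < days.length, x = j + t ∧ pvPid days[t] = c ∧
      k ≤ (days.take t).countP (fun d => pvPid d == c) := by
  intro days
  induction days with
  | nil => intro j k x; simp [PySem.List.enumerate]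
  | cons day rest ih =>
    intro j k x
    by_cases h : pvPid day = c
    · cases k with
      | zero =>
        simp only [PySem.List.enumerate, List.map_cons, List.filter_cons, h, beq_self_eq_true,
          if_pos, List.drop_zero]
        constructor
        · intro hx
          rcases List.mem_cons.1 hx with hx | hx
          · exact ⟨0, by simp, by simpa using hx, by simpa using h, by simp⟩
          · have hx' : x ∈ (((((PySem.List.enumerate rest (j+1)).map (fun p => (pvPid p.2, p.1))).filter
                (fun q => q.1 == c)).map (fun q => q.2)).drop 0) := by simpa using hx
            rcases (ih (j+1) 0 x).1 hx' with ⟨t, ht, hxe, hpe, _⟩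
            exact ⟨t + 1, by simp only [List.length_cons]; omega, by push_cast; omega, by simpa using hpe, by simp⟩
        · intro ⟨t, ht, hxe, hpe, _⟩
          cases t with
          | zero => exact List.mem_cons.2 (Or.inl (by simpa using hxe))
          | succ t' =>
            apply List.mem_cons.2; right
            have := (ih (j+1) 0 x).2 ⟨t', by simpa using ht, by push_cast at hxe ⊢; omega,
              by simpa using hpe, by simp⟩
            simpa using this
      | succ k' =>
        simp only [PySem.List.enumerate, List.map_cons, List.filter_cons, h, beq_self_eq_true,
          if_pos, List.drop_succ_cons]
        rw [ih (j+1) k' x]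
        constructor
        · intro ⟨t, ht, hxe, hpe, hk⟩
          refine ⟨t + 1, by simp only [List.length_cons]; omega, by push_cast; omega, by simpa using hpe, ?_⟩
          simp only [List.take_succ_cons, List.countP_cons, h, beq_self_eq_true, if_pos]
          omega
        · intro ⟨t, ht, hxe, hpe, hk⟩
          cases t with
          | zero => simp at hk
          | succ t' =>
            refine ⟨t', by simpa using ht, by push_cast at hxe ⊢; omega, by simpa using hpe, ?_⟩
            simp only [List.take_succ_cons, List.countP_cons, h, beq_self_eq_true, if_pos] at hk
            omega
    · have hb : ((pvPid day == c) = false) := by simpa using h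
      simp only [PySem.List.enumerate, List.map_cons, List.filter_cons, hb, Bool.false_eq_true,
        if_false]
      rw [ih (j+1) k x]
      constructor
      · intro ⟨t, ht, hxe, hpe, hk⟩
        refine ⟨t + 1, by simp only [List.length_cons]; omega, by push_cast; omega, by simpa using hpe, ?_⟩
        simp only [List.take_succ_cons, List.countP_cons, hb]
        simpa using hk
      · intro ⟨t, ht, hxe, hpe, hk⟩
        cases t with
        | zero => exact absurd (by simpa using hpe) h
        | succ t' =>
          refine ⟨t', by simpa using ht, by push_cast at hxe ⊢; omega, by simpa using hpe, ?_⟩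
          simp only [List.take_succ_cons, List.countP_cons, hb] at hk
          simpa using hk

lemma mem_enumerate_of_lt : ∀ (days : List (List (String × String))) (j : Int) (t : Nat)
    (_ : t < days.length), ((j + t, days[t]) : Int × _) ∈ PySem.List.enumerate days j := by
  intro days
  induction days with
  | nil => intro j t ht; simp at ht
  | cons day rest ih =>
    intro j t ht
    cases t with
    | zero => simp [PySem.List.enumerate]
    | succ t' =>
      simp only [PySem.List.enumerate, List.mem_cons]
      right
      have := ih (j+1) t' (by simpa using ht)
      simpa [add_assoc, add_comm, add_left_comm] using this

lemma mem_addfold (keep : Int) : ∀ (vals : List (List Int)) (s : PySem.Set Int) (x : Int),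
    x ∈ vals.foldl (fun s idxs => (PySem.List.slice idxs (some keep)).foldl
        (fun s i => PySem.Set.add s i) s) s ↔
    x ∈ s ∨ ∃ idxs ∈ vals, x ∈ PySem.List.slice idxs (some keep) := by
  intro vals
  induction vals with
  | nil => intro s x; simp
  | cons v vs ih =>
    intro s x
    simp only [List.foldl_cons]
    rw [ih]
    rw [PySem.Set.mem_foldl_add (f := fun (i : Int) => i)]
    constructor
    · rintro ((h | ⟨b, hb, rfl⟩) | ⟨idxs, hi, hx⟩)
      · exact Or.inl h
      · exact Or.inr ⟨v, by simp, hb⟩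
      · exact Or.inr ⟨idxs, by simp [hi], hx⟩
    · rintro (h | ⟨idxs, hi, hx⟩)
      · exact Or.inl (Or.inl h)
      · rcases List.mem_cons.1 hi with rfl | hi
        · exact Or.inl (Or.inr ⟨x, hx, rfl⟩)
        · exact Or.inr ⟨idxs, hi, hx⟩

lemma nodup_keys_pos (days : List (List (String × String))) : (egsPositions days).keys.Nodup := by
  unfold egsPositions
  have h := PySem.Dict.nodup_keys_foldl_modify_key (PySem.List.enumerate days)
    (fun (p : Int × List (String × String)) => pvPid p.2) ([] : List Int)
    (fun _ p => fun l => l ++ [p.1]) PySem.Dict.empty (by simp [PySem.Dict.keys_empty])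
  simpa using h

lemma getD_pos (days : List (List (String × String))) (c : String) :
    (egsPositions days).getD c [] =
    ((((PySem.List.enumerate days).map (fun p => (pvPid p.2, p.1))).filter
        (fun q => q.1 == c)).map (fun q => q.2)) := by
  unfold egsPositions
  rw [← List.foldl_map (f := fun (p : Int × List (String × String)) => (pvPid p.2, p.1))
      (g := fun d (q : String × Int) => PySem.Dict.modify d q.1 [] (fun l => l ++ [q.2]))]
  rw [PySem.Dict.getD_foldl_modify_append]
  simp [PySem.Dict.getD_empty]

lemma keys_pos (days : List (List (String × String))) :
    (egsPositions days).keys = PySem.Set.ofList ((PySem.List.enumerate days).map (fun p => pvPid p.2)) := by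
  unfold egsPositions
  have h := PySem.Dict.keys_foldl_modify_key (PySem.List.enumerate days)
    (fun (p : Int × List (String × String)) => pvPid p.2) ([] : List Int)
    (fun _ p => fun l => l ++ [p.1]) PySem.Dict.empty
  simpa [PySem.Dict.keys_empty, PySem.Set.update_nil_left] using h

lemma memChar (days : List (List (String × String))) (m : Int) (i : Nat) (hi : i < days.length) :
    (PySem.Set.contains (egsReassign days (max m 0)) (i : Int) = true) ↔
    m ≤ ((days.take i).countP (fun d => pvPid d == pvPid days[i]) : Int) := by
  rw [PySem.Set.contains_iff]
  unfold egsReassign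
  rw [mem_addfold]
  have hsl : ∀ idxs : List Int, PySem.List.slice idxs (some (max m 0)) = idxs.drop (max m 0).toNat :=
    fun idxs => PySem.List.slice_from idxs (by omega)
  have hv : (egsPositions days).values =
      (egsPositions days).keys.map (fun k => (egsPositions days).getD k []) :=
    PySem.Dict.values_eq_map_keys _ (nodup_keys_pos days) []
  constructor
  · rintro (h | ⟨idxs, hidxs, hx⟩)
    · simp [PySem.Set.empty] at h
    · rw [hv] at hidxs
      rcases List.mem_map.1 hidxs with ⟨c, _, rfl⟩
      rw [hsl, getD_pos] at hx
      rcases (Pchar c days 0 (max m 0).toNat (i : Int)).1 hx with ⟨t, ht, hxe, hpe, hk⟩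
      have hti : t = i := by omega
      subst hti
      rw [hpe]
      omega
  · intro h
    refine Or.inr ⟨(egsPositions days).getD (pvPid days[i]) [], ?_, ?_⟩
    · rw [hv]
      refine List.mem_map.2 ⟨pvPid days[i], ?_, rfl⟩
      rw [keys_pos]
      rw [PySem.Set.mem_ofList]
      exact List.mem_map.2 ⟨((0 : Int) + i, days[i]), mem_enumerate_of_lt days 0 i hi, rfl⟩
    · rw [hsl, getD_pos]
      exact (Pchar (pvPid days[i]) days 0 (max m 0).toNat (i : Int)).2
        ⟨i, hi, by omega, rfl, by omega⟩

lemma B_eq_spec (m : Int) (reas : PySem.Set Int) : ∀ (l : List (List (String × String)))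
    (j : Int) (occ : PySem.Dict String Int) (sid : Int) (acc : List (List (String × String))),
    (∀ t, ∀ _ : t < l.length, (PySem.Set.contains reas (j + t) = true ↔
        m ≤ occ.getD (pvPid l[t]) 0 + ((l.take t).countP (fun d => pvPid d == pvPid l[t]) : Int))) →
    ((PySem.List.enumerate l j).foldl (egsStepB reas) (sid, acc)).2 = acc ++ egsSpec m occ sid l := by
  intro l
  induction l with
  | nil => intro j occ sid acc _; simp [PySem.List.enumerate, egsSpec]
  | cons day rest ih =>
    intro j occ sid acc hmem
    have h0 : PySem.Set.contains reas j = true ↔ m ≤ occ.getD (pvPid day) 0 := by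
      have h := hmem 0 (by simp)
      simpa using h
    have hmem' : ∀ t, ∀ _ : t < rest.length,
        (PySem.Set.contains reas (j + 1 + t) = true ↔
          m ≤ (occ.insert (pvPid day) (occ.getD (pvPid day) 0 + 1)).getD (pvPid rest[t]) 0 +
            ((rest.take t).countP (fun d => pvPid d == pvPid rest[t]) : Int)) := by
      intro t ht
      have h := hmem (t + 1) (by simp only [List.length_cons]; omega)
      have e : (j + ((t + 1 : Nat) : Int)) = (j + 1 + (t : Int)) := by push_cast; ring
      simp only [List.getElem_cons_succ, List.take_succ_cons, List.countP_cons, e] at h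
      rw [h, PySem.Dict.getD_insert]
      by_cases hpp : pvPid rest[t] = pvPid day
      · simp only [hpp, if_pos, beq_self_eq_true]
        
        push_cast
        constructor <;> intro <;> omega
      · have hb : ((pvPid day == pvPid rest[t]) = false) := by
          simp [BEq.beq]; exact fun hh => hpp hh.symm
        simp only [hpp, hb, Bool.false_eq_true, if_false, add_zero]
    by_cases hc : m ≤ occ.getD (pvPid day) 0
    · have hct : PySem.Set.contains reas j = true := h0.2 hc
      simp only [PySem.List.enumerate, List.foldl_cons, egsStepB, hct, if_pos, egsSpec, if_pos hc]
      rw [ih (j + 1) (occ.insert (pvPid day) (occ.getD (pvPid day) 0 + 1)) (sid + 1)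
          (acc ++ [pvReassigned day sid]) hmem']
      simp
    · have hct : PySem.Set.contains reas j = false := by
        rcases Bool.eq_false_or_eq_true (PySem.Set.contains reas j) with h | h
        · exact absurd (h0.1 h) hc
        · exact h
      simp only [PySem.List.enumerate, List.foldl_cons, egsStepB, hct, Bool.false_eq_true, if_false,
        egsSpec, if_neg hc]
      rw [ih (j + 1) (occ.insert (pvPid day) (occ.getD (pvPid day) 0 + 1)) sid
          (acc ++ [day]) hmem']
      simp

-- ===== VERDICT (by name: the statement is the Claim_ definition above) =====
theorem enforce_group_size_py_spec : Claim_equal_enforce_group_size_py := by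
  intro days m _ _
  unfold Spec_enforce_group_size_py enforce_group_size_py enforce_group_size_py_alt
  rw [A_eq_spec m days PySem.Dict.empty PySem.Dict.empty 9000 []
      (fun p => by simp only [PySem.Dict.getD_empty]; omega)
      (fun p => by simp only [PySem.Dict.getD_empty]; omega)]
  rw [B_eq_spec m (egsReassign days (max m 0)) days 0 PySem.Dict.empty 9000 []
      (fun t ht => by
        have h := memChar days m t ht
        simpa [PySem.Dict.getD_empty] using h)]
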